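-- pv_equiv track=rewrite | github.com/Fondamenti18/fondamenti-di-programmazione | students/1716380/homework02/program03.py | cod
-- ===== SOURCE A (Python) =====
-- def cod(insieme,code):
--     lisc=[]
--     dicc={}
--     torna=set()
--     for c,i in enumerate(code):
--         dicc[c]=i
--     for i in dicc:
--         ii=dicc[i]
--         for x in dicc:
--             xx=dicc[x]
--             if ii==xx:
--                 if i==x:
--                     continue
--                 lisc.append((i,x))
--     for ins in insieme:
--         dicw={}
--         lisw=[]
--         for n,w in enumerate(ins):
--                dicw[n]=w
--         for i in dicw:
--             ii=dicw[i]
--             for x in dicw: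
--                 xx=dicw[x]
--                 if ii==xx:
--                     if i==x:
--                         continue
--                     lisw.append((i,x))
--         if lisc==lisw:
--             torna.add(ins)
--     return torna
-- ===== SOURCE B (Python) =====
-- def cod(insieme, code):
--     # Group positions by character in one pass; two strings have the same equal-element
--     # position pattern iff their lists of size->=2 position groups coincide, so compare
--     # those directly instead of materialising the quadratic pair list.
--     def sig(s):
--         groups = {}
--         for i, ch in enumerate(s):
--             groups.setdefault(ch, []).append(i)
--         return [g for g in groups.values() if len(g) > 1]
--     target = sig(code)
--     out = set()
--     for w in insieme:
--         if target == sig(w):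
--             out.add(w)
--     return out
-- ===== Notes on version B (the rewrite author's own statement) =====
-- stated objective: faster
-- what changed: Instead of building an index->char dict and scanning all index pairs to materialise the quadratic equal-position pair list per string, B groups positions by character in one pass and compares the lists of size->=2 position groups, which determine the pair list exactly.
import Mathlib
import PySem

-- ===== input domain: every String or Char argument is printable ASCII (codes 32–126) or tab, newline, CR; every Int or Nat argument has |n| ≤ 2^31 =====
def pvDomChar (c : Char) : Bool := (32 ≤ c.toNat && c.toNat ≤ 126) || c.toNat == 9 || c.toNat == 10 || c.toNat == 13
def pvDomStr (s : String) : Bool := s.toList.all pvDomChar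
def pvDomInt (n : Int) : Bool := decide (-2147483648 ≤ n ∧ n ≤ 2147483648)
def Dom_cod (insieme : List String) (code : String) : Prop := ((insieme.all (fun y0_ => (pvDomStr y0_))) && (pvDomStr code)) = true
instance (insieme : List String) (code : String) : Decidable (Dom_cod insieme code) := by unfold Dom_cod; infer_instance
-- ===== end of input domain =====

-- B replaces A's quadratic scan over all index pairs by comparing, per string, the list of
-- size-≥2 same-character position groups, built in one pass (objective: faster).

-- ===== PORT A =====
-- A writes the same per-string pair computation twice verbatim (once for `code`, once for
-- each `ins`); it is factored into this one helper used at both places, unchanged.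
def codPairs (s : List Char) : List (Int × Int) :=
  let dicc : PySem.Dict Int Char :=
    (PySem.List.enumerate s).foldl (fun d p => d.insert p.1 p.2) PySem.Dict.empty
  dicc.keys.foldl (fun lisc i =>
    let ii := dicc.getD i ' '   -- dicc[i]; i is a key of dicc, so the lookup always succeeds
    dicc.keys.foldl (fun lisc x =>
      let xx := dicc.getD x ' '
      if ii = xx then (if i = x then lisc else lisc ++ [(i, x)]) else lisc) lisc) []

def cod (insieme : List String) (code : String) : List String :=
  let lisc := codPairs code.toList
  insieme.foldl (fun torna ins =>
    let lisw := codPairs ins.toList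
    if lisc = lisw then PySem.Set.add torna ins else torna) PySem.Set.empty

-- ===== PORT B =====
def codSig (s : List Char) : List (List Int) :=
  let groups : PySem.Dict Char (List Int) :=
    (PySem.List.enumerate s).foldl (fun g p => g.modify p.2 [] (· ++ [p.1])) PySem.Dict.empty
  groups.values.filter (fun g => 1 < g.length)

def cod_alt (insieme : List String) (code : String) : List String :=
  let target := codSig code.toList
  insieme.foldl (fun out w =>
    if target = codSig w.toList then PySem.Set.add out w else out) PySem.Set.empty

-- ===== PRECONDITION & SPEC =====
def Spec_cod (insieme : List String) (code : String) (out : List String) : Prop := out = cod_alt insieme code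
instance (insieme : List String) (code : String) (out : List String) : Decidable (Spec_cod insieme code out) := by unfold Spec_cod; infer_instance

-- ===== CLAIM (what is proved, stated in full; the proofs are below) =====
def Claim_equal_cod : Prop := ∀ (insieme : List String) (code : String), Dom_cod insieme code → Spec_cod insieme code (cod insieme code)

-- ===== LEMMAS AND PROOFS =====

-- the value of A's inner pair block at entry p of the enumeration e
def codBlock (e : List (Int × Char)) (p : Int × Char) : List (Int × Int) :=
  (e.filter (fun q => q.2 == p.2 && !(q.1 == p.1))).map (fun q => (p.1, q.1))

-- positions of character c in s, in order
def grpOf (s : List Char) (c : Char) : List Int :=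
  ((PySem.List.enumerate s).filter (fun q => q.2 == c)).map Prod.fst

-- A's pair list / B's signature, in canonical form
def pairsL (s : List Char) : List (Int × Int) :=
  (PySem.List.enumerate s).flatMap (codBlock (PySem.List.enumerate s))
def sigL (s : List Char) : List (List Int) :=
  ((PySem.List.dedup s).map (grpOf s)).filter (fun g => decide (1 < g.length))

def mysort (l : List Int) : List Int := l.mergeSort (fun a b => decide (a ≤ b))
def findGrp (S : List (List Int)) (i : Int) : List Int :=
  (S.find? (fun g => decide (i ∈ g))).getD []
-- the pair list is a function of the signature …
def buildP (S : List (List Int)) : List (Int × Int) :=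
  (mysort S.flatten).flatMap (fun i => ((findGrp S i).filter (fun x => !(x == i))).map (fun x => (i, x)))
-- … and the signature is a function of the pair list
def extractS (P : List (Int × Int)) : List (List Int) :=
  PySem.List.dedup (P.map (fun pr =>
    mysort (pr.1 :: P.filterMap (fun q => if q.1 == pr.1 then some q.2 else none))))

theorem codPairs_eq_block (s : List Char) :
    codPairs s =
    (PySem.List.enumerate s).foldl (fun acc p => acc ++ codBlock (PySem.List.enumerate s) p) [] := by
  unfold codPairs
  set e := PySem.List.enumerate s with he
  have hitems : ((e.foldl (fun d p => d.insert p.1 p.2)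
      (PySem.Dict.empty : PySem.Dict Int Char))).items = e := by
    have h2 : (e.map (Prod.fst : Int × Char → Int)).Nodup := by
      rw [he, PySem.List.map_fst_enumerate]; exact PySem.List.nodup_pyRange_one _ _
    have h := PySem.Dict.items_foldl_insert_fresh e
        (Prod.fst : Int × Char → Int) Prod.snd PySem.Dict.empty
        (by intro a _; simp [PySem.Dict.contains_empty]) h2
    simpa using h
  set dicc : PySem.Dict Int Char := e.foldl (fun d p => d.insert p.1 p.2) PySem.Dict.empty with hd
  have hkeys : dicc.keys = e.map Prod.fst := by
    simp only [PySem.Dict.keys, hitems]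
  have hknd : dicc.keys.Nodup := by
    rw [hkeys, he, PySem.List.map_fst_enumerate]; exact PySem.List.nodup_pyRange_one _ _
  have hget : ∀ p ∈ e, dicc.getD p.1 ' ' = p.2 := by
    intro p hp
    exact PySem.Dict.getD_of_mem_items dicc
      (show (p.1, p.2) ∈ dicc.items from by rw [hitems]; simpa using hp) hknd ' '
  simp only [hkeys]
  rw [List.foldl_map]
  apply PySem.List.foldl_congr_mem
  intro acc p hp
  rw [List.foldl_map, hget p hp]
  have step1 : List.foldl (fun lisc (q : Int × Char) =>
        if p.2 = dicc.getD q.1 ' ' then if p.1 = q.1 then lisc else lisc ++ [(p.1, q.1)] else lisc) acc e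
      = List.foldl (fun lisc (q : Int × Char) =>
        if (q.2 == p.2 && !(q.1 == p.1)) = true then lisc ++ [(p.1, q.1)] else lisc) acc e := by
    apply PySem.List.foldl_congr_mem
    intro a q hq
    rw [hget q hq]
    by_cases h1 : p.2 = q.2
    · by_cases h2 : p.1 = q.1
      · simp [h1, h2]
      · simp [h1, h2, Ne.symm h2]
    · simp [h1, Ne.symm h1]
  rw [step1, PySem.List.foldl_append_if (p := fun q : Int × Char => (q.2 == p.2 && !(q.1 == p.1)))
      (f := fun q : Int × Char => (p.1, q.1))]
  rfl

theorem codPairs_eq_pairsL (s : List Char) : codPairs s = pairsL s := by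
  rw [codPairs_eq_block, PySem.List.foldl_append_eq_flatMap]
  rfl

theorem codSig_eq_sigL (s : List Char) : codSig s = sigL s := by
  unfold codSig
  set e := PySem.List.enumerate s with he
  set groups : PySem.Dict Char (List Int) :=
    e.foldl (fun g p => g.modify p.2 [] (· ++ [p.1])) PySem.Dict.empty with hg
  have hkeys : groups.keys = PySem.List.dedup s := by
    rw [hg]
    rw [PySem.Dict.keys_foldl_modify_key e (fun p => p.2) [] (fun _ p old => old ++ [p.1]) PySem.Dict.empty]
    rw [he, PySem.List.map_snd_enumerate, PySem.List.dedup_eq_ofList]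
    rfl
  have hknd : groups.keys.Nodup := by
    rw [hkeys]; exact PySem.List.nodup_dedup s
  have hgrp : ∀ c : Char, groups.getD c [] = grpOf s c := by
    intro c
    have hswap : groups = (e.map (fun p : Int × Char => (p.2, p.1))).foldl
        (fun g q => g.modify q.1 [] (· ++ [q.2])) PySem.Dict.empty := by
      rw [List.foldl_map]
    rw [hswap, PySem.Dict.getD_foldl_modify_append]
    simp [grpOf, PySem.Dict.getD_empty, List.filter_map, Function.comp_def]
    rfl
  show List.filter (fun g => decide (1 < g.length)) groups.values = sigL s
  rw [PySem.Dict.values_eq_map_keys groups hknd []]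
  rw [hkeys]
  unfold sigL
  congr 1
  exact List.map_congr_left (fun c _ => hgrp c)


-- === generic helpers ===
theorem flatMap_congr_mem {α β : Type} {l : List α} {f g : α → List β}
    (h : ∀ x ∈ l, f x = g x) : l.flatMap f = l.flatMap g := by
  induction l with
  | nil => rfl
  | cons a l ih =>
    simp only [List.flatMap_cons]
    rw [h a (by simp), ih (fun x hx => h x (by simp [hx]))]

theorem flatMap_filter {α β : Type} (l : List α) (p : α → Bool) (f : α → List β)
    (h : ∀ x ∈ l, p x = false → f x = []) : l.flatMap f = (l.filter p).flatMap f := by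
  induction l with
  | nil => rfl
  | cons a l ih =>
    simp only [List.flatMap_cons, List.filter_cons]
    rcases hp : p a with _ | _
    · simp [h a (by simp) hp, ih (fun x hx h0 => h x (by simp [hx]) h0)]
    · simp only [if_pos trivial, List.flatMap_cons]
      rw [ih (fun x hx h0 => h x (by simp [hx]) h0)]

theorem eq_of_pairwise_lt_mem : ∀ (a b : List Int), a.Pairwise (· < ·) → b.Pairwise (· < ·) →
    (∀ x, x ∈ a ↔ x ∈ b) → a = b := by
  intro a
  induction a with
  | nil =>
    intro b _ _ hm
    cases b with
    | nil => rfl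
    | cons y b => exact absurd ((hm y).mpr (by simp)) (by simp)
  | cons x a ih =>
    intro b ha hb hm
    cases b with
    | nil => exact absurd ((hm x).mp (by simp)) (by simp)
    | cons y b =>
      have hxa := (List.pairwise_cons.mp ha).1
      have hyb := (List.pairwise_cons.mp hb).1
      have hxy : x = y := by
        rcases List.mem_cons.mp ((hm x).mp (by simp)) with h | h
        · exact h
        · rcases List.mem_cons.mp ((hm y).mpr (by simp)) with h' | h'
          · exact h'.symm
          · have := hxa y h'
            have := hyb x h
            omega
      subst hxy
      congr 1
      apply ih _ (List.pairwise_cons.mp ha).2 (List.pairwise_cons.mp hb).2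
      intro z
      constructor
      · intro hz
        rcases List.mem_cons.mp ((hm z).mp (by simp [hz])) with h | h
        · exact absurd (hxa z hz) (by omega)
        · exact h
      · intro hz
        rcases List.mem_cons.mp ((hm z).mpr (by simp [hz])) with h | h
        · exact absurd (hyb z hz) (by omega)
        · exact h

theorem fst_uniq {l : List (Int × Char)} (hl : (l.map Prod.fst).Nodup) :
    ∀ p ∈ l, ∀ q ∈ l, p.1 = q.1 → p = q := by
  induction l with
  | nil => intro p hp; simp at hp
  | cons a l ih =>
    intro p hp q hq h
    simp only [List.map_cons, List.nodup_cons] at hl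
    rcases List.mem_cons.mp hp with rfl | hp' <;> rcases List.mem_cons.mp hq with rfl | hq'
    · rfl
    · exact absurd (h ▸ List.mem_map_of_mem hq') hl.1
    · exact absurd (h ▸ List.mem_map_of_mem hp') hl.1
    · exact ih hl.2 p hp' q hq' h

-- mysort facts
theorem mysort_perm (l : List Int) : (mysort l).Perm l := List.mergeSort_perm l _
theorem mysort_mem (l : List Int) (x : Int) : x ∈ mysort l ↔ x ∈ l := (mysort_perm l).mem_iff
theorem mysort_pairwise_lt {l : List Int} (h : l.Nodup) : (mysort l).Pairwise (· < ·) := by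
  have hle : (mysort l).Pairwise (fun a b => decide (a ≤ b) = true) :=
    List.pairwise_mergeSort (by intro a b c h1 h2; simp at *; omega) (by intro a b; simp; omega) l
  have hnd : (mysort l).Nodup := (mysort_perm l).nodup_iff.mpr h
  have := List.Pairwise.and hle hnd
  exact this.imp (by intro a b h; simp at h; omega)

-- === facts about the enumeration and groups ===
theorem nodup_fst_e (s : List Char) : ((PySem.List.enumerate s).map Prod.fst).Nodup := by
  rw [PySem.List.map_fst_enumerate]; exact PySem.List.nodup_pyRange_one _ _
theorem pairwise_fst_e (s : List Char) :
    ((PySem.List.enumerate s).map Prod.fst).Pairwise (· < ·) := by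
  rw [PySem.List.map_fst_enumerate]; exact PySem.List.pairwise_lt_pyRange_one _ _

theorem mem_grpOf (s : List Char) (c : Char) (i : Int) :
    i ∈ grpOf s c ↔ (i, c) ∈ PySem.List.enumerate s := by
  unfold grpOf
  simp only [List.mem_map, List.mem_filter]
  constructor
  · rintro ⟨q, ⟨hq, hc⟩, rfl⟩
    have : q = (q.1, c) := by
      have := beq_iff_eq.mp hc
      exact Prod.ext rfl this
    rwa [← this]
  · intro h
    exact ⟨(i, c), ⟨h, by simp⟩, rfl⟩

theorem grp_pairwise (s : List Char) (c : Char) : (grpOf s c).Pairwise (· < ·) := by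
  unfold grpOf
  exact (pairwise_fst_e s).sublist (List.Sublist.map _ List.filter_sublist)
theorem grp_nodup (s : List Char) (c : Char) : (grpOf s c).Nodup :=
  (grp_pairwise s c).imp (fun h => by omega)
theorem grp_disj (s : List Char) {c c' : Char} {i : Int}
    (h : i ∈ grpOf s c) (h' : i ∈ grpOf s c') : c = c' := by
  rw [mem_grpOf] at h h'
  have := fst_uniq (nodup_fst_e s) _ h _ h' rfl
  exact (Prod.mk.injEq _ _ _ _).mp this |>.2
theorem grp_mem_self (s : List Char) {p : Int × Char} (hp : p ∈ PySem.List.enumerate s) :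
    p.1 ∈ grpOf s p.2 := (mem_grpOf s p.2 p.1).mpr hp
theorem grp_of_mem (s : List Char) {p : Int × Char} (hp : p ∈ PySem.List.enumerate s) {c : Char}
    (h : p.1 ∈ grpOf s c) : c = p.2 := grp_disj s h (grp_mem_self s hp)
theorem snd_mem (s : List Char) {p : Int × Char} (hp : p ∈ PySem.List.enumerate s) : p.2 ∈ s := by
  have : p.2 ∈ (PySem.List.enumerate s).map Prod.snd := List.mem_map_of_mem hp
  rwa [PySem.List.map_snd_enumerate] at this

theorem codBlock_eq (s : List Char) (p : Int × Char) :
    codBlock (PySem.List.enumerate s) p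
      = ((grpOf s p.2).filter (fun x => !(x == p.1))).map (fun x => (p.1, x)) := by
  unfold codBlock grpOf
  rw [List.filter_map, List.map_map, List.filter_filter]
  congr 1
  apply List.filter_congr
  intro q _
  simp [Function.comp, Bool.and_comm]

theorem mem_sigL (s : List Char) (g : List Int) :
    g ∈ sigL s ↔ ∃ c ∈ s, g = grpOf s c ∧ 1 < g.length := by
  unfold sigL
  simp only [List.mem_filter, List.mem_map, PySem.List.mem_dedup, decide_eq_true_eq]
  constructor
  · rintro ⟨⟨c, hc, rfl⟩, hlen⟩; exact ⟨c, hc, rfl, hlen⟩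
  · rintro ⟨c, hc, rfl, hlen⟩; exact ⟨⟨c, hc, rfl⟩, hlen⟩

theorem sig_flatten_nodup (s : List Char) : (sigL s).flatten.Nodup := by
  rw [List.nodup_flatten]
  constructor
  · intro g hg
    obtain ⟨c, _, rfl, _⟩ := (mem_sigL s g).mp hg
    exact grp_nodup s c
  · unfold sigL
    apply List.Pairwise.sublist List.filter_sublist
    rw [List.pairwise_map]
    apply List.Pairwise.imp_of_mem (l := PySem.List.dedup s)
      (R := fun a b => a ≠ b)
    · intro a b ha hb hne i hia hib
      exact hne (grp_disj s hia hib)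
    · exact (PySem.List.nodup_dedup s)

theorem mem_sig_flatten (s : List Char) (i : Int) :
    i ∈ (sigL s).flatten ↔ ∃ p ∈ PySem.List.enumerate s, p.1 = i ∧ 1 < (grpOf s p.2).length := by
  rw [List.mem_flatten]
  constructor
  · rintro ⟨g, hg, hig⟩
    obtain ⟨c, _, rfl, hlen⟩ := (mem_sigL s g).mp hg
    have := (mem_grpOf s c i).mp hig
    exact ⟨(i, c), this, rfl, hlen⟩
  · rintro ⟨p, hp, rfl, hlen⟩
    refine ⟨grpOf s p.2, (mem_sigL s _).mpr ⟨p.2, snd_mem s hp, rfl, hlen⟩, grp_mem_self s hp⟩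

-- the small-group block is empty; the big-group block is not
theorem grp_filter_eq_erase (s : List Char) (p : Int × Char) :
    (grpOf s p.2).filter (fun x => !(x == p.1)) = (grpOf s p.2).erase p.1 := by
  rw [(grp_nodup s p.2).erase_eq_filter p.1]
  apply List.filter_congr; intro x _; simp [bne]
theorem block_empty_iff (s : List Char) {p : Int × Char} (hp : p ∈ PySem.List.enumerate s) :
    ((grpOf s p.2).filter (fun x => !(x == p.1)) = []) ↔ ¬ 1 < (grpOf s p.2).length := by
  rw [grp_filter_eq_erase]
  have hm := grp_mem_self s hp
  have hlen := List.length_erase_of_mem hm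
  constructor
  · intro h
    have := congrArg List.length h
    rw [hlen] at this
    simp at this
    have : (grpOf s p.2).length ≤ 1 := by omega
    omega
  · intro h
    have h1 : (grpOf s p.2).length = 1 := by
      have := List.length_pos_of_mem hm; omega
    rw [List.eq_nil_iff_length_eq_zero, hlen, h1]


theorem find?_unique {S : List (List Int)} {i : Int} {v : List Int}
    (h1 : ∀ g ∈ S, i ∈ g → g = v) (h2 : v ∈ S) (h3 : i ∈ v) :
    S.find? (fun g => decide (i ∈ g)) = some v := by
  induction S with
  | nil => simp at h2
  | cons g S ih =>
    by_cases hg : i ∈ g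
    · rw [List.find?_cons_of_pos (by simpa using hg)]
      rw [h1 g (by simp) hg]
    · rw [List.find?_cons_of_neg (by simpa using hg)]
      refine ih (fun g' hg' => h1 g' (by simp [hg'])) ?_
      rcases List.mem_cons.mp h2 with rfl | h
      · exact absurd h3 hg
      · exact h

theorem findGrp_eq (s : List Char) {p : Int × Char} (hp : p ∈ PySem.List.enumerate s)
    (hbig : 1 < (grpOf s p.2).length) : findGrp (sigL s) p.1 = grpOf s p.2 := by
  unfold findGrp
  rw [find?_unique (v := grpOf s p.2) ?_ ?_ (grp_mem_self s hp)]
  · rfl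
  · intro g hg hig
    obtain ⟨c, _, rfl, _⟩ := (mem_sigL s g).mp hg
    rw [grp_of_mem s hp hig]
  · exact (mem_sigL s _).mpr ⟨p.2, snd_mem s hp, rfl, hbig⟩

theorem pairsL_eq_buildP (s : List Char) : pairsL s = buildP (sigL s) := by
  unfold pairsL buildP
  rw [flatMap_filter (PySem.List.enumerate s) (fun p => decide (1 < (grpOf s p.2).length)) _ ?_]
  swap
  · intro p hp h0
    rw [codBlock_eq]
    rw [(block_empty_iff s hp).mpr (by simpa using h0)]
    rfl
  have hfst : ((PySem.List.enumerate s).filter (fun p => decide (1 < (grpOf s p.2).length))).map Prod.fst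
      = mysort (sigL s).flatten := by
    apply eq_of_pairwise_lt_mem
    · exact (pairwise_fst_e s).sublist (List.Sublist.map _ List.filter_sublist)
    · exact mysort_pairwise_lt (sig_flatten_nodup s)
    · intro x
      rw [mysort_mem, mem_sig_flatten]
      simp only [List.mem_map, List.mem_filter, decide_eq_true_eq]
      constructor
      · rintro ⟨p, ⟨hp, hb⟩, rfl⟩; exact ⟨p, hp, rfl, hb⟩
      · rintro ⟨p, hp, rfl, hb⟩; exact ⟨p, ⟨hp, hb⟩, rfl⟩
  rw [← hfst, List.flatMap_map]
  apply flatMap_congr_mem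
  intro p hp
  have hp' := List.mem_filter.mp hp
  rw [codBlock_eq, findGrp_eq s hp'.1 (by simpa using hp'.2)]


-- Set.add facts
theorem set_add_of_mem {α : Type} [BEq α] [LawfulBEq α] {s : PySem.Set α} {x : α}
    (h : x ∈ s) : PySem.Set.add s x = s := by
  show (if s.contains x then s else s ++ [x]) = s
  simp [h]

theorem foldl_add_const {α : Type} [BEq α] [LawfulBEq α] :
    ∀ (m : List α) (w : α) (acc : PySem.Set α), (∀ y ∈ m, y = w) →
    m.foldl PySem.Set.add acc = if m = [] then acc else PySem.Set.add acc w := by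
  intro m
  induction m with
  | nil => intro w acc _; simp
  | cons y m ih =>
    intro w acc h
    obtain rfl : y = w := h y (by simp)
    simp only [List.foldl_cons]
    rw [if_neg (List.cons_ne_nil y m)]
    rw [ih y _ (fun z hz => h z (by simp [hz]))]
    by_cases hm : m = []
    · rw [if_pos hm]
    · rw [if_neg hm, set_add_of_mem (by rw [PySem.Set.mem_add]; exact Or.inr rfl)]

theorem foldl_add_flatMap {α β : Type} [BEq β] [LawfulBEq β] :
    ∀ (l : List α) (f : α → List β) (v : α → β), (∀ x ∈ l, ∀ y ∈ f x, y = v x) →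
    ∀ (acc : PySem.Set β),
    (l.flatMap f).foldl PySem.Set.add acc
      = l.foldl (fun acc x => if f x = [] then acc else PySem.Set.add acc (v x)) acc := by
  intro l
  induction l with
  | nil => intro f v _ acc; rfl
  | cons a l ih =>
    intro f v h acc
    simp only [List.flatMap_cons, List.foldl_append, List.foldl_cons]
    rw [foldl_add_const (f a) (v a) acc (h a (by simp))]
    rw [ih f v (fun x hx => h x (by simp [hx]))]

theorem flatMap_single {β : Type} {l : List (Int × Char)} (hl : (l.map Prod.fst).Nodup)
    {p : Int × Char} (hp : p ∈ l) (h : Int × Char → List β) :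
    l.flatMap (fun q => if q.1 == p.1 then h q else []) = h p := by
  induction l with
  | nil => simp at hp
  | cons a l ih =>
    simp only [List.map_cons, List.nodup_cons] at hl
    rcases List.mem_cons.mp hp with rfl | hp'
    · simp only [List.flatMap_cons]
      have : l.flatMap (fun q => if q.1 == p.1 then h q else []) = [] := by
        apply List.flatMap_eq_nil_iff.mpr
        intro q hq
        rw [if_neg]
        simp only [beq_iff_eq]
        intro he
        exact hl.1 (he ▸ List.mem_map_of_mem hq)
      rw [this, List.append_nil]
      simp
    · have hne : ¬ (a.1 == p.1) = true := by
        simp only [beq_iff_eq]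
        intro he
        exact hl.1 (by rw [he]; exact List.mem_map_of_mem hp')
      simp only [List.flatMap_cons]
      rw [if_neg hne, ih hl.2 hp']
      simp

-- the partners of p.1 in the pair list are exactly p's group minus p.1
theorem partners_eq (s : List Char) {p : Int × Char} (hp : p ∈ PySem.List.enumerate s) :
    (pairsL s).filterMap (fun q => if q.1 == p.1 then some q.2 else none)
      = (grpOf s p.2).filter (fun x => !(x == p.1)) := by
  unfold pairsL
  rw [List.filterMap_flatMap]
  have : ∀ q ∈ PySem.List.enumerate s,
      (codBlock (PySem.List.enumerate s) q).filterMap (fun r => if r.1 == p.1 then some r.2 else none)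
      = if q.1 == p.1 then (grpOf s q.2).filter (fun x => !(x == q.1)) else [] := by
    intro q _
    rw [codBlock_eq]
    by_cases hq : q.1 = p.1
    · rw [if_pos (by simpa using hq)]
      rw [List.filterMap_map]
      rw [show ((fun r : Int × Int => if r.1 == p.1 then some r.2 else none) ∘ fun x => (q.1, x))
            = some from by funext x; simp [hq]]
      exact List.filterMap_some
    · rw [if_neg (by simpa using hq)]
      rw [List.filterMap_map]
      rw [show ((fun r : Int × Int => if r.1 == p.1 then some r.2 else none) ∘ fun x => (q.1, x))
            = fun _ => none from by funext x; simp [hq]]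
      exact List.filterMap_none _
  rw [flatMap_congr_mem this, flatMap_single (nodup_fst_e s) hp]

-- the sorted class of p.1 is exactly p's group
theorem class_eq (s : List Char) {p : Int × Char} (hp : p ∈ PySem.List.enumerate s) :
    mysort (p.1 :: (grpOf s p.2).filter (fun x => !(x == p.1))) = grpOf s p.2 := by
  have hm := grp_mem_self s hp
  have hperm : (p.1 :: (grpOf s p.2).filter (fun x => !(x == p.1))).Perm (grpOf s p.2) := by
    rw [grp_filter_eq_erase]
    exact (List.perm_cons_erase hm).symm
  apply eq_of_pairwise_lt_mem
  · apply mysort_pairwise_lt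
    exact hperm.nodup_iff.mpr (grp_nodup s p.2)
  · exact grp_pairwise s p.2
  · intro x
    rw [mysort_mem]
    exact hperm.mem_iff

theorem set_add_of_not_mem {α : Type} [BEq α] [LawfulBEq α] {s : PySem.Set α} {x : α}
    (h : x ∉ s) : PySem.Set.add s x = s ++ [x] := by
  show (if s.contains x then s else s ++ [x]) = s ++ [x]
  simp [h]

theorem grp_ne_nil (s : List Char) {c : Char} (hc : c ∈ s) : grpOf s c ≠ [] := by
  have : c ∈ (PySem.List.enumerate s).map Prod.snd := by rw [PySem.List.map_snd_enumerate]; exact hc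
  obtain ⟨p, hp, rfl⟩ := List.mem_map.mp this
  intro h
  have := grp_mem_self s hp
  rw [h] at this
  simp at this

theorem dedup_append_singleton {α : Type} [BEq α] [LawfulBEq α] (l : List α) (c : α) :
    PySem.List.dedup (l ++ [c])
      = if c ∈ l then PySem.List.dedup l else PySem.List.dedup l ++ [c] := by
  rw [PySem.List.dedup_eq_ofList, PySem.List.dedup_eq_ofList, PySem.Set.ofList_eq_foldl,
      PySem.Set.ofList_eq_foldl, List.foldl_append, List.foldl_cons, List.foldl_nil]
  by_cases hc : c ∈ l
  · rw [if_pos hc]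
    exact set_add_of_mem (by rw [← PySem.Set.ofList_eq_foldl, PySem.Set.mem_ofList]; exact hc)
  · rw [if_neg hc]
    exact set_add_of_not_mem (by rw [← PySem.Set.ofList_eq_foldl, PySem.Set.mem_ofList]; exact hc)

theorem fold_add_eq_dedup (l : List Char) (f : Char → List Int) (pb : List Int → Bool)
    (hinj : ∀ a ∈ l, ∀ b ∈ l, f a = f b → a = b) :
    l.foldl (fun acc c => if pb (f c) then PySem.Set.add acc (f c) else acc) []
      = ((PySem.List.dedup l).map f).filter pb := by
  induction l using List.reverseRecOn with
  | nil => rfl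
  | append_singleton l c ih =>
    have hinj' : ∀ a ∈ l, ∀ b ∈ l, f a = f b → a = b :=
      fun a ha b hb => hinj a (by simp [ha]) b (by simp [hb])
    rw [List.foldl_append, List.foldl_cons, List.foldl_nil, ih hinj', dedup_append_singleton]
    by_cases hc : c ∈ l
    · rw [if_pos hc]
      by_cases hpb : pb (f c)
      · rw [if_pos hpb]
        apply set_add_of_mem
        rw [List.mem_filter]
        exact ⟨List.mem_map_of_mem (by rwa [PySem.List.mem_dedup]), hpb⟩
      · rw [if_neg hpb]
    · rw [if_neg hc, List.map_append, List.filter_append]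
      by_cases hpb : pb (f c)
      · rw [if_pos hpb]
        rw [set_add_of_not_mem]
        · simp [hpb]
        · rw [List.mem_filter]
          rintro ⟨hmem, -⟩
          obtain ⟨a, ha, hfa⟩ := List.mem_map.mp hmem
          rw [PySem.List.mem_dedup] at ha
          exact hc (hinj a (by simp [ha]) c (by simp) hfa ▸ ha)
      · rw [if_neg hpb]
        simp [hpb]

theorem sigL_eq_extractS (s : List Char) : sigL s = extractS (pairsL s) := by
  unfold extractS
  have hmap : (pairsL s).map (fun pr =>
        mysort (pr.1 :: (pairsL s).filterMap (fun q => if q.1 == pr.1 then some q.2 else none)))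
      = (PySem.List.enumerate s).flatMap (fun p =>
        ((grpOf s p.2).filter (fun x => !(x == p.1))).map (fun _ => grpOf s p.2)) := by
    conv_lhs => rw [show pairsL s = (PySem.List.enumerate s).flatMap
        (codBlock (PySem.List.enumerate s)) from rfl]
    rw [List.map_flatMap]
    apply flatMap_congr_mem
    intro p hp
    rw [codBlock_eq, List.map_map]
    apply List.map_congr_left
    intro x _
    show mysort ((p.1, x).1 :: (pairsL s).filterMap _) = _
    rw [show ((p.1, x) : Int × Int).1 = p.1 from rfl]
    rw [partners_eq s hp, class_eq s hp]
  rw [hmap, PySem.List.dedup_eq_ofList, PySem.Set.ofList_eq_foldl]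
  rw [foldl_add_flatMap _ _ (fun p => grpOf s p.2) ?_]
  swap
  · intro p _ y hy
    obtain ⟨-, -, rfl⟩ := List.mem_map.mp hy
    rfl
  have hcongr : (PySem.List.enumerate s).foldl (fun acc p =>
        if ((grpOf s p.2).filter (fun x => !(x == p.1))).map (fun _ => grpOf s p.2) = []
        then acc else PySem.Set.add acc (grpOf s p.2)) []
      = (PySem.List.enumerate s).foldl (fun acc p =>
        if (fun g => decide (1 < g.length)) (grpOf s p.2) = true
        then PySem.Set.add acc (grpOf s p.2) else acc) [] := by
    apply PySem.List.foldl_congr_mem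
    intro acc p hp
    by_cases hb : 1 < (grpOf s p.2).length
    · rw [if_neg, if_pos (by simpa using hb)]
      rw [List.map_eq_nil_iff]
      intro h0
      exact (block_empty_iff s hp).mp h0 hb
    · rw [if_pos, if_neg (by simpa using hb)]
      rw [List.map_eq_nil_iff]
      exact (block_empty_iff s hp).mpr hb
  rw [hcongr]
  rw [show (PySem.List.enumerate s).foldl (fun acc p =>
        if (fun g => decide (1 < g.length)) (grpOf s p.2) = true
        then PySem.Set.add acc (grpOf s p.2) else acc) []
      = ((PySem.List.enumerate s).map Prod.snd).foldl (fun acc c =>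
        if (fun g => decide (1 < g.length)) (grpOf s c) = true
        then PySem.Set.add acc (grpOf s c) else acc) [] from (List.foldl_map (f := Prod.snd) (g := fun acc c => if (fun g => decide (1 < g.length)) (grpOf s c) = true then PySem.Set.add acc (grpOf s c) else acc)).symm]
  rw [PySem.List.map_snd_enumerate]
  rw [fold_add_eq_dedup s (grpOf s) (fun g => decide (1 < g.length)) ?_]
  · rfl
  · intro a ha b hb hf
    obtain ⟨i, hi⟩ := List.exists_mem_of_ne_nil _ (grp_ne_nil s ha)
    exact grp_disj s hi (hf ▸ hi)


theorem pairs_iff_sig (s t : List Char) : pairsL s = pairsL t ↔ sigL s = sigL t := by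
  constructor
  · intro h; rw [sigL_eq_extractS, sigL_eq_extractS, h]
  · intro h; rw [pairsL_eq_buildP, pairsL_eq_buildP, h]

theorem cod_eq_cod_alt (insieme : List String) (code : String) :
    cod insieme code = cod_alt insieme code := by
  unfold cod cod_alt
  apply PySem.List.foldl_congr_mem
  intro acc w _
  by_cases h : codSig code.toList = codSig w.toList
  · rw [if_pos h, if_pos]
    rw [codPairs_eq_pairsL, codPairs_eq_pairsL]
    rw [pairs_iff_sig]
    rw [← codSig_eq_sigL, ← codSig_eq_sigL]
    exact h
  · rw [if_neg h, if_neg]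
    rw [codPairs_eq_pairsL, codPairs_eq_pairsL, pairs_iff_sig,
        ← codSig_eq_sigL, ← codSig_eq_sigL]
    exact h

-- ===== VERDICT (by name: the statement is the Claim_ definition above) =====
theorem cod_spec : Claim_equal_cod := by
  intro insieme code _
  unfold Spec_cod
  exact cod_eq_cod_alt insieme code
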